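-- pv_equiv track=rewrite | github.com/MrinaliniTh/Algorithms | Interview_question/first_occrance_of_one.py | find_first_one
-- ===== SOURCE A (Python) =====
-- def find_first_one(nums):
--     low = 0
--     high = len(nums) - 1
--     if nums[0] == 1:
--         return 0
--     while low <= high:
--         mid = int((low + high) / 2)
--         if nums[mid] == 1 and nums[mid - 1] == 0:
--             return mid
--         elif nums[mid] == 1:
--             high = mid -1
--         else:
--             low = mid + 1
--     return -1
-- ===== SOURCE B (Python) =====
-- def find_first_one(nums):
--     # recursive binary search (same probe sequence as the iterative original)
--     if nums[0] == 1:
--         return 0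
--
--     def go(low, high):
--         if low > high:
--             return -1
--         mid = (low + high) // 2
--         if nums[mid] == 1 and nums[mid - 1] == 0:
--             return mid
--         if nums[mid] == 1:
--             return go(low, mid - 1)
--         return go(mid + 1, high)
--
--     return go(0, len(nums) - 1)
-- ===== Notes on version B (the rewrite author's own statement) =====
-- stated objective: alternative
-- what changed: The iterative while-loop binary search (mutable low/high, sentinel fall-through) is re-decomposed as a recursive helper go(low, high) with an explicit low>high base case and floor division for the midpoint.
import Mathlib
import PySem

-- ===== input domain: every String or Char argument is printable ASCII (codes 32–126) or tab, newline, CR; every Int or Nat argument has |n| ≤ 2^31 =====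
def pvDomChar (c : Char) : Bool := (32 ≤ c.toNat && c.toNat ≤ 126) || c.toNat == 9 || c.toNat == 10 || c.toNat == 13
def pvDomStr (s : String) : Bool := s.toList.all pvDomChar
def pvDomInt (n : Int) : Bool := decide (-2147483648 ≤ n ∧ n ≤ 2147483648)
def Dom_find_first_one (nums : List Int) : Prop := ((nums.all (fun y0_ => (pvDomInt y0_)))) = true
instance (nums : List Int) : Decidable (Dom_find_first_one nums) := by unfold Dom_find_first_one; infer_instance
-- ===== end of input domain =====

-- B re-decomposes A's iterative while-loop binary search as a recursive helper with an
-- explicit base case and floor-division midpoint; same return value on every non-empty list.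


-- ===== PORT A =====
-- the while loop, with fuel covering its (finite) iteration count; state = (low, high)
def pvA_loop (nums : List Int) (fuel : Nat) (low high : Int) : Int :=
  match fuel with
  | 0 => -1  -- never reached: fuel below is enough for the loop's real iteration count
  | fuel + 1 =>
    if low ≤ high then
      -- mid = int((low + high) / 2): truncating division (exact here, |values| small)
      let mid : Int := PySem.Int.truncdiv (low + high) 2
      if PySem.List.pyGet? nums mid = some 1 then
        if PySem.List.pyGet? nums (mid - 1) = some 0 then mid
        else pvA_loop nums fuel low (mid - 1)         -- high = mid - 1
      else pvA_loop nums fuel (mid + 1) high          -- low = mid + 1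
    else -1

def find_first_one (nums : List Int) : Int :=
  if PySem.List.pyGet? nums 0 = some 1 then 0        -- nums[0] (IndexError on [] is outside Pre_)
  else pvA_loop nums (nums.length + 1) 0 ((nums.length : Int) - 1)

-- ===== PORT B =====
-- B's recursive helper go(low, high); terminates because the range shrinks at each call
def pvB_go (nums : List Int) (low high : Int) : Int :=
  if low > high then -1
  else
    let mid : Int := PySem.Int.floordiv (low + high) 2
    if PySem.List.pyGet? nums mid = some 1 then
      if PySem.List.pyGet? nums (mid - 1) = some 0 then mid
      else pvB_go nums low (mid - 1)
    else pvB_go nums (mid + 1) high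
termination_by (high + 1 - low).toNat
decreasing_by
  · have h := PySem.Int.floordiv_two_mid_bounds (lo := low) (hi := high) (by omega)
    omega
  · have h := PySem.Int.floordiv_two_mid_bounds (lo := low) (hi := high) (by omega)
    omega

def find_first_one_alt (nums : List Int) : Int :=
  if PySem.List.pyGet? nums 0 = some 1 then 0
  else pvB_go nums 0 ((nums.length : Int) - 1)

-- ===== PRECONDITION & SPEC =====
-- Pre_ excludes only the empty list, on which both implementations raise IndexError at nums[0].
def Pre_find_first_one (nums : List Int) : Prop := nums ≠ []
instance (nums : List Int) : Decidable (Pre_find_first_one nums) := by unfold Pre_find_first_one; infer_instance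
def pvWitness_find_first_one : List Int := [0, 0, 1, 1]
def Spec_find_first_one (nums : List Int) (out : Int) : Prop := out = find_first_one_alt nums
instance (nums : List Int) (out : Int) : Decidable (Spec_find_first_one nums out) := by unfold Spec_find_first_one; infer_instance

-- ===== CLAIM (what is proved, stated in full; the proofs are below) =====
def Claim_equal_find_first_one : Prop := ∀ (nums : List Int), Dom_find_first_one nums → Pre_find_first_one nums → Spec_find_first_one nums (find_first_one nums)

-- ===== LEMMAS AND PROOFS =====

-- for 0 ≤ low ≤ high the truncating and flooring midpoints coincide
lemma pv_mid_eq (low high : Int) (h0 : 0 ≤ low) (h : low ≤ high) :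
    PySem.Int.truncdiv (low + high) 2 = PySem.Int.floordiv (low + high) 2 := by
  rw [PySem.Int.floordiv_eq_ediv_of_pos (by omega)]
  simp only [PySem.Int.truncdiv]
  exact Int.tdiv_eq_ediv_of_nonneg (by omega)

-- the fueled loop equals the recursive helper once fuel exceeds the range length
lemma pv_loop_eq_go (nums : List Int) :
    ∀ (fuel : Nat) (low high : Int), 0 ≤ low → high + 1 - low ≤ (fuel : Int) →
      pvA_loop nums fuel low high = pvB_go nums low high := by
  intro fuel
  induction fuel with
  | zero =>
    intro low high h0 hf
    rw [pvB_go]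
    simp only [pvA_loop]
    rw [if_pos (show low > high by omega)]
  | succ n ih =>
    intro low high h0 hf
    rw [pvB_go]
    simp only [pvA_loop]
    by_cases hle : low ≤ high
    · rw [if_pos hle, if_neg (show ¬ low > high by omega)]
      have hmid := pv_mid_eq low high h0 hle
      have hb := PySem.Int.floordiv_two_mid_bounds (lo := low) (hi := high) hle
      rw [hmid]
      set mid := PySem.Int.floordiv (low + high) 2 with hm
      by_cases h1 : PySem.List.pyGet? nums mid = some 1
      · rw [if_pos h1, if_pos h1]
        by_cases h2 : PySem.List.pyGet? nums (mid - 1) = some 0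
        · rw [if_pos h2, if_pos h2]
        · rw [if_neg h2, if_neg h2]
          exact ih low (mid - 1) h0 (by omega)
      · rw [if_neg h1, if_neg h1]
        exact ih (mid + 1) high (by omega) (by omega)
    · rw [if_neg hle, if_pos (show low > high by omega)]

-- ===== VERDICT (by name: the statement is the Claim_ definition above) =====
theorem find_first_one_spec : Claim_equal_find_first_one := by
  intro nums _ _
  unfold Spec_find_first_one find_first_one find_first_one_alt
  by_cases h : PySem.List.pyGet? nums 0 = some 1
  · rw [if_pos h, if_pos h]
  · rw [if_neg h, if_neg h]
    exact pv_loop_eq_go nums (nums.length + 1) 0 ((nums.length : Int) - 1) le_rfl (by push_cast; omega)
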